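-- pv_equiv track=rewrite | github.com/yogzz2023/29j | test.py | group_measurements
-- ===== SOURCE A (Python) =====
-- def group_measurements(measurements, max_time_diff):
--     grouped_measurements = []
--     current_group = []
--     for i in range(len(measurements)):
--         if i == 0 or measurements[i][3] - measurements[i-1][3] < max_time_diff:
--             current_group.append(measurements[i])
--         else:
--             if current_group:
--                 grouped_measurements.append(current_group)
--             current_group = [measurements[i]]
--     if current_group:
--         grouped_measurements.append(current_group)
--     return grouped_measurements
-- ===== SOURCE B (Python) =====
-- def group_measurements(measurements, max_time_diff):
--     if not measurements:
--         return []
--     bounds = [0]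
--     for i in range(1, len(measurements)):
--         if measurements[i][3] - measurements[i-1][3] >= max_time_diff:
--             bounds.append(i)
--     bounds.append(len(measurements))
--     return [measurements[a:b] for a, b in zip(bounds, bounds[1:])]
-- ===== Notes on version B (the rewrite author's own statement) =====
-- stated objective: alternative
-- what changed: Replaces A's fused accumulate-and-flush loop (mutable current_group with conditional flushes) by two passes: first collect the boundary indices where the time gap reaches max_time_diff, then build the groups by slicing between consecutive boundaries.
import Mathlib
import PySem

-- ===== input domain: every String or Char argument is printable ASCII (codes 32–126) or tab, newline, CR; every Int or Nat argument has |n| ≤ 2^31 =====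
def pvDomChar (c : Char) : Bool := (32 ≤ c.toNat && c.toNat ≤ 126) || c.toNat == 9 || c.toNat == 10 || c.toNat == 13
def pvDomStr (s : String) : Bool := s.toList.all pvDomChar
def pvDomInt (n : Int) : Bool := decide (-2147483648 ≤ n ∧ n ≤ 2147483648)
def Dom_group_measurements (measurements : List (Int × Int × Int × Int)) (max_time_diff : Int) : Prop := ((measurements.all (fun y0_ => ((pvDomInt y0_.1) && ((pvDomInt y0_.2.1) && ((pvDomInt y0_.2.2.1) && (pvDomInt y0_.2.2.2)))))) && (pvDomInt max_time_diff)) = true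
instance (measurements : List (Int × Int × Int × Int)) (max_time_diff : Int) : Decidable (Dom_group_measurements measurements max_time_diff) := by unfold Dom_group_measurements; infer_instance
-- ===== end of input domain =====

-- B replaces A's fused accumulate-and-flush loop by a boundary-index pass followed by slicing
-- between consecutive boundaries (objective: alternative decomposition, same O(n) cost).

-- ===== PORT A =====
-- A's loop body: indices are Nats of range(len(ms)); ms[i] / ms[i-1] are in range, so List.getD
-- is exact here (and for i = 0 the first disjunct short-circuits as in Python).
def pvStepA (ms : List (Int × Int × Int × Int)) (mtd : Int)
    (st : List (List (Int × Int × Int × Int)) × List (Int × Int × Int × Int)) (i : Nat) :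
    List (List (Int × Int × Int × Int)) × List (Int × Int × Int × Int) :=
  if i = 0 ∨ (ms.getD i (0,0,0,0)).2.2.2 - (ms.getD (i-1) (0,0,0,0)).2.2.2 < mtd then
    (st.1, st.2 ++ [ms.getD i (0,0,0,0)])
  else
    ((if st.2 = [] then st.1 else st.1 ++ [st.2]), [ms.getD i (0,0,0,0)])

-- A's final flush of current_group
def pvFinishA (st : List (List (Int × Int × Int × Int)) × List (Int × Int × Int × Int)) :
    List (List (Int × Int × Int × Int)) :=
  if st.2 = [] then st.1 else st.1 ++ [st.2]

def group_measurements (measurements : List (Int × Int × Int × Int)) (max_time_diff : Int) :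
    List (List (Int × Int × Int × Int)) :=
  pvFinishA ((List.range measurements.length).foldl (pvStepA measurements max_time_diff) ([], []))

-- ===== PORT B =====
-- Source B's boundary pass: range(1, len(ms)) is List.range' 1 (len - 1); in-range Nat indexing via getD.
def pvBounds (ms : List (Int × Int × Int × Int)) (mtd : Int) : List Nat :=
  (List.range' 1 (ms.length - 1)).foldl
    (fun bs i =>
      if mtd ≤ (ms.getD i (0,0,0,0)).2.2.2 - (ms.getD (i-1) (0,0,0,0)).2.2.2 then bs ++ [i] else bs)
    [0]

-- ms[a:b] with 0 ≤ a, b Nats is exactly (ms.drop a).take (b - a) (PySem.List.slice_natCast);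
-- bounds[1:] is bounds.tail (PySem.List.slice_from_one).
-- the comprehension [ms[a:b] for a, b in zip(bounds, bounds[1:])]
def pvSlices (ms : List (Int × Int × Int × Int)) (bounds : List Nat) :
    List (List (Int × Int × Int × Int)) :=
  (bounds.zip bounds.tail).map (fun p => (ms.drop p.1).take (p.2 - p.1))

def group_measurements_alt (measurements : List (Int × Int × Int × Int)) (max_time_diff : Int) :
    List (List (Int × Int × Int × Int)) :=
  if measurements = [] then []
  else pvSlices measurements (pvBounds measurements max_time_diff ++ [measurements.length])

-- ===== PRECONDITION & SPEC =====
def Spec_group_measurements (measurements : List (Int × Int × Int × Int)) (max_time_diff : Int) (out : List (List (Int × Int × Int × Int))) : Prop := out = group_measurements_alt measurements max_time_diff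
instance (measurements : List (Int × Int × Int × Int)) (max_time_diff : Int) (out : List (List (Int × Int × Int × Int))) : Decidable (Spec_group_measurements measurements max_time_diff out) := by unfold Spec_group_measurements; infer_instance

-- ===== CLAIM (what is proved, stated in full; the proofs are below) =====
def Claim_equal_group_measurements : Prop := ∀ (measurements : List (Int × Int × Int × Int)) (max_time_diff : Int), Dom_group_measurements measurements max_time_diff → Spec_group_measurements measurements max_time_diff (group_measurements measurements max_time_diff)

-- ===== LEMMAS AND PROOFS =====

-- adjacent pairs of l ++ [x], for nonempty l
theorem pv_zip_tail_concat {α : Type} (l : List α) (x d : α) (h : l ≠ []) :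
    (l ++ [x]).zip (l ++ [x]).tail = l.zip l.tail ++ [(l.getLastD d, x)] := by
  induction l with
  | nil => exact absurd rfl h
  | cons a t ih =>
    cases t with
    | nil => simp
    | cons b t' =>
      have := ih (by simp)
      simpa using this

theorem pv_getLastD_mem {α : Type} (l : List α) (d : α) (h : l ≠ []) : l.getLastD d ∈ l := by
  induction l with
  | nil => exact absurd rfl h
  | cons a t ih =>
    cases t with
    | nil => simp
    | cons b t' => simpa using List.mem_cons_of_mem a (ih (by simp))

-- a slice with both bounds inside ys is unchanged by appending an element
theorem pv_slice_append {α : Type} (ys : List α) (m : α) (a b : Nat) (hb : b ≤ ys.length) :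
    ((ys ++ [m]).drop a).take (b - a) = (ys.drop a).take (b - a) := by
  by_cases ha : a ≤ ys.length
  · rw [List.drop_append_of_le_length ha]
    exact List.take_append_of_le_length (by rw [List.length_drop]; omega)
  · have h0 : b - a = 0 := by omega
    simp [h0]

-- the main invariant: after the index loop, A's state is (slices between the inner
-- boundaries, the tail from the last boundary), and every boundary is < length
theorem pv_inv (mtd : Int) (ms : List (Int × Int × Int × Int)) (h : ms ≠ []) :
    (∀ x ∈ pvBounds ms mtd, x < ms.length) ∧ pvBounds ms mtd ≠ [] ∧
    (List.range ms.length).foldl (pvStepA ms mtd) ([], []) =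
      (((pvBounds ms mtd).zip (pvBounds ms mtd).tail).map
          (fun p => (ms.drop p.1).take (p.2 - p.1)),
        ms.drop ((pvBounds ms mtd).getLastD 0)) := by
  induction ms using List.reverseRecOn with
  | nil => exact absurd rfl h
  | append_singleton ys m ih =>
    by_cases hy : ys = []
    · subst hy
      refine ⟨by simp [pvBounds], by simp [pvBounds], ?_⟩
      simp [pvBounds, pvStepA, List.range_succ]
    · obtain ⟨hb, hne, hst⟩ := ih hy
      have hylen : 1 ≤ ys.length := by
        cases ys with | nil => exact absurd rfl hy | cons a t => simp
      have hlen3 : (ys ++ [m]).length = ys.length + 1 := by simp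
      -- the boundary fold over the common prefix agrees between ys and ys ++ [m]
      have hboundsPrefix :
          (List.range' 1 (ys.length - 1)).foldl
            (fun bs i =>
              if mtd ≤ ((ys ++ [m]).getD i (0,0,0,0)).2.2.2 -
                  ((ys ++ [m]).getD (i-1) (0,0,0,0)).2.2.2 then bs ++ [i] else bs) [0]
          = pvBounds ys mtd := by
        unfold pvBounds
        apply List.foldl_ext
        intro bs i hi
        have hi' := List.mem_range'_1.mp hi
        rw [List.getD_append ys [m] _ i (by omega), List.getD_append ys [m] _ (i-1) (by omega)]
      have hm : ([m].getD (ys.length - ys.length) (0,0,0,0)) = m := by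
        simp
      have hbounds :
          pvBounds (ys ++ [m]) mtd =
            if mtd ≤ m.2.2.2 - (ys.getD (ys.length - 1) (0,0,0,0)).2.2.2 then
              pvBounds ys mtd ++ [ys.length] else pvBounds ys mtd := by
        unfold pvBounds
        have hlen : (ys ++ [m]).length - 1 = ys.length := by simp
        rw [hlen]
        have hsplit : List.range' 1 ys.length = List.range' 1 (ys.length - 1) ++ [ys.length] := by
          conv_lhs => rw [show ys.length = (ys.length - 1) + 1 by omega]
          rw [List.range'_concat]
          congr 1
          simp
          omega
        rw [hsplit, List.foldl_append, hboundsPrefix]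
        simp only [List.foldl_cons, List.foldl_nil]
        rw [List.getD_append_right ys [m] _ ys.length (by omega),
            List.getD_append ys [m] _ (ys.length - 1) (by omega), hm]
        rfl
      -- A's fold over the common prefix agrees between ys and ys ++ [m]
      have hstPrefix :
          (List.range ys.length).foldl (pvStepA (ys ++ [m]) mtd) ([], []) =
            (List.range ys.length).foldl (pvStepA ys mtd) ([], []) := by
        apply List.foldl_ext
        intro st i hi
        have hi' := List.mem_range.mp hi
        unfold pvStepA
        rw [List.getD_append ys [m] _ i (by omega), List.getD_append ys [m] _ (i-1) (by omega)]
      have hrange : List.range (ys ++ [m]).length = List.range ys.length ++ [ys.length] := by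
        rw [hlen3, List.range_succ]
      have hLmem : (pvBounds ys mtd).getLastD 0 ∈ pvBounds ys mtd :=
        pv_getLastD_mem _ 0 hne
      have hLlt : (pvBounds ys mtd).getLastD 0 < ys.length := hb _ hLmem
      have hCne : ys.drop ((pvBounds ys mtd).getLastD 0) ≠ [] := by
        intro hc
        have hdl := List.length_drop (l := ys) (i := (pvBounds ys mtd).getLastD 0)
        rw [hc] at hdl
        simp only [List.length_nil] at hdl
        omega
      have hmapPrefix :
          ((pvBounds ys mtd).zip (pvBounds ys mtd).tail).map
              (fun p => ((ys ++ [m]).drop p.1).take (p.2 - p.1)) =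
            ((pvBounds ys mtd).zip (pvBounds ys mtd).tail).map
              (fun p => (ys.drop p.1).take (p.2 - p.1)) := by
        apply List.map_congr_left
        intro p hp
        obtain ⟨hp1, hp2⟩ := List.of_mem_zip (by rwa [← Prod.mk.eta (p := p)] at hp)
        exact pv_slice_append ys m p.1 p.2 (le_of_lt (hb _ (List.mem_of_mem_tail hp2)))
      have hdropL : (ys ++ [m]).drop ((pvBounds ys mtd).getLastD 0) =
          ys.drop ((pvBounds ys mtd).getLastD 0) ++ [m] :=
        List.drop_append_of_le_length (by omega)
      rw [hrange, List.foldl_append, hstPrefix, hst]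
      simp only [List.foldl_cons, List.foldl_nil]
      unfold pvStepA
      rw [List.getD_append_right ys [m] _ ys.length (by omega),
          List.getD_append ys [m] _ (ys.length - 1) (by omega), hm]
      by_cases hcond : mtd ≤ m.2.2.2 - (ys.getD (ys.length - 1) (0,0,0,0)).2.2.2
      · -- new boundary at ys.length
        rw [hbounds, if_pos hcond]
        have hnz : ¬ (ys.length = 0 ∨ m.2.2.2 - (ys.getD (ys.length - 1) (0,0,0,0)).2.2.2 < mtd) := by
          rintro (h1 | h2)
          · omega
          · omega
        rw [if_neg hnz]
        refine ⟨?_, by simp, ?_⟩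
        · intro x hx
          rcases List.mem_append.mp hx with hx' | hx'
          · have := hb x hx'; omega
          · simp at hx'; omega
        · rw [if_neg hCne, Prod.mk.injEq]
          constructor
          · rw [pv_zip_tail_concat (pvBounds ys mtd) ys.length 0 hne, List.map_append, hmapPrefix]
            congr 1
            simp only [List.map_cons, List.map_nil]
            congr 1
            rw [hdropL, List.take_append_of_le_length (le_of_eq (List.length_drop).symm)]
            exact (List.take_of_length_le (le_of_eq List.length_drop)).symm
          · rw [List.getLastD_concat, List.drop_append_of_le_length (le_refl _), List.drop_length]
            simp
      · -- same group continues
        rw [hbounds, if_neg hcond]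
        have hnz : ys.length = 0 ∨ m.2.2.2 - (ys.getD (ys.length - 1) (0,0,0,0)).2.2.2 < mtd := by
          right; omega
        rw [if_pos hnz]
        refine ⟨?_, hne, ?_⟩
        · intro x hx; have := hb x hx; omega
        · rw [hmapPrefix, hdropL]

-- ===== VERDICT (by name: the statement is the Claim_ definition above) =====
theorem group_measurements_spec : Claim_equal_group_measurements := by
  unfold Claim_equal_group_measurements
  intro ms mtd _
  unfold Spec_group_measurements group_measurements group_measurements_alt
  by_cases h : ms = []
  · subst h; simp [pvFinishA]
  · obtain ⟨hb, hne, hst⟩ := pv_inv mtd ms h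
    rw [if_neg h, hst]
    unfold pvFinishA pvSlices
    have hLlt : (pvBounds ms mtd).getLastD 0 < ms.length :=
      hb _ (pv_getLastD_mem _ 0 hne)
    have hCne : ms.drop ((pvBounds ms mtd).getLastD 0) ≠ [] := by
      intro hc
      have hdl := List.length_drop (l := ms) (i := (pvBounds ms mtd).getLastD 0)
      rw [hc] at hdl
      simp only [List.length_nil] at hdl
      omega
    simp only []
    rw [if_neg hCne, pv_zip_tail_concat (pvBounds ms mtd) ms.length 0 hne, List.map_append]
    congr 1
    simp only [List.map_cons, List.map_nil]
    congr 1
    exact (List.take_of_length_le (le_of_eq List.length_drop)).symm
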